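-- pv_equiv track=rewrite | github.com/longwave-innovation-lab/terraform-aws-git-pipeline | lambda_code/app.py | extract_env_variables
-- ===== SOURCE A (Python) =====
-- from typing import Dict, List, Optional, Any
--
-- class EnvVars:
--     REPO_NAME = "REPO_NAME"
--     IMAGE_TAG = "IMAGE_TAG"
--     BRANCH_NAME = "BRANCH_NAME"
--     CUSTOM_REGISTRY_NAME = "CUSTOM_REGISTRY_NAME"
--     SNS_TOPIC_ARN = "SNS_TOPIC_ARN"
--     EXPORTED_ENV_VARS = "exportedEnvironmentVariables"
--
-- def extract_env_variables(env_vars: Optional[List[Dict[str, str]]]) -> Dict[str, Optional[str]]: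
--     """Extract required environment variables from CodeBuild event"""
--     if not env_vars:
--         return {"repo_name": None, "branch_name": None, "custom_registry_name": None}
--
--     result = {"repo_name": None, "branch_name": None, "custom_registry_name": None}
--
--     for env_var in env_vars:
--         name = env_var.get("name", "").upper()
--         value = env_var.get("value")
--
--         if name == EnvVars.REPO_NAME:
--             result["repo_name"] = value
--         elif name == EnvVars.BRANCH_NAME:
--             result["branch_name"] = value
--         elif name == EnvVars.CUSTOM_REGISTRY_NAME:
--             result["custom_registry_name"] = value
--
--     return result
-- ===== SOURCE B (Python) =====
-- def extract_env_variables(env_vars):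
--     """Extract required environment variables from CodeBuild event"""
--     def last_value(target):
--         for env_var in reversed(env_vars or []):
--             if env_var.get("name", "").upper() == target:
--                 return env_var.get("value")
--         return None
--     return {
--         "repo_name": last_value("REPO_NAME"),
--         "branch_name": last_value("BRANCH_NAME"),
--         "custom_registry_name": last_value("CUSTOM_REGISTRY_NAME"),
--     }
-- ===== Notes on version B (the rewrite author's own statement) =====
-- stated objective: alternative
-- what changed: B removes the single forward pass with in-loop if/elif dispatch into a mutated result dict and instead performs three independent backward scans over the reversed list, each returning the first (i.e. Python's last) entry whose upper-cased name matches, with early exit; the None/empty special case disappears.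
import Mathlib
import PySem

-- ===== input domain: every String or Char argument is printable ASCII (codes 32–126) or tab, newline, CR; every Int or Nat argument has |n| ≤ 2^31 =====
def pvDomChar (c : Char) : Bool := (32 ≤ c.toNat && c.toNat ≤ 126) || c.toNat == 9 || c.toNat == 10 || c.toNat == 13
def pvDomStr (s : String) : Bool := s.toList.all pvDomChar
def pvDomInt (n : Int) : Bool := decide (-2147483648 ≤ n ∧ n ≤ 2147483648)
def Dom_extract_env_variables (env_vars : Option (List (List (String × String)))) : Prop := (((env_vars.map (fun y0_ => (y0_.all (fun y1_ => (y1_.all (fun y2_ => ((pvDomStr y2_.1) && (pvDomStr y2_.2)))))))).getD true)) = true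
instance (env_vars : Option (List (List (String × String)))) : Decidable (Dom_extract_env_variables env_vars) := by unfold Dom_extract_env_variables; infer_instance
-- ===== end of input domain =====

-- B replaces the forward if/elif-dispatch pass by three independent backward
-- first-match scans over the reversed list (objective: alternative).

-- ===== PORT A =====
def extract_env_variables (env_vars : Option (List (List (String × String)))) : List (String × Option String) :=
  match env_vars with
  | none => [("repo_name", none), ("branch_name", none), ("custom_registry_name", none)]
  | some l =>
    if l.isEmpty then [("repo_name", none), ("branch_name", none), ("custom_registry_name", none)]
    else
      (l.foldl (fun result env_var =>
          let name := PySem.Str.upper ((PySem.Dict.ofList env_var).getD "name" "")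
          let value := (PySem.Dict.ofList env_var).get? "value"
          if name = "REPO_NAME" then result.insert "repo_name" value
          else if name = "BRANCH_NAME" then result.insert "branch_name" value
          else if name = "CUSTOM_REGISTRY_NAME" then result.insert "custom_registry_name" value
          else result)
        (PySem.Dict.ofList [("repo_name", none), ("branch_name", none), ("custom_registry_name", none)])).items

-- ===== PORT B =====
-- the 'for … return / return None' loop of last_value, on the already-reversed list
def pvLastValue (target : String) : List (List (String × String)) → Option String
  | [] => none
  | env_var :: rest =>
      if PySem.Str.upper ((PySem.Dict.ofList env_var).getD "name" "") = target
      then (PySem.Dict.ofList env_var).get? "value"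
      else pvLastValue target rest

def extract_env_variables_alt (env_vars : Option (List (List (String × String)))) : List (String × Option String) :=
  let rev := (env_vars.getD []).reverse
  [("repo_name", pvLastValue "REPO_NAME" rev),
   ("branch_name", pvLastValue "BRANCH_NAME" rev),
   ("custom_registry_name", pvLastValue "CUSTOM_REGISTRY_NAME" rev)]

-- ===== PRECONDITION & SPEC =====
def Spec_extract_env_variables (env_vars : Option (List (List (String × String)))) (out : List (String × Option String)) : Prop := out = extract_env_variables_alt env_vars
instance (env_vars : Option (List (List (String × String)))) (out : List (String × Option String)) : Decidable (Spec_extract_env_variables env_vars out) := by unfold Spec_extract_env_variables; infer_instance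

-- ===== CLAIM (what is proved, stated in full; the proofs are below) =====
def Claim_equal_extract_env_variables : Prop := ∀ (env_vars : Option (List (List (String × String)))), Dom_extract_env_variables env_vars → Spec_extract_env_variables env_vars (extract_env_variables env_vars)

-- ===== LEMMAS AND PROOFS =====

-- last value written for target name N while scanning l forward, starting from cur
def pvTrace (N : String) : List (List (String × String)) → Option String → Option String
  | [], cur => cur
  | x :: l, cur =>
      pvTrace N l (if PySem.Str.upper ((PySem.Dict.ofList x).getD "name" "") = N
                   then (PySem.Dict.ofList x).get? "value" else cur)

lemma pvAfold (l : List (List (String × String))) (a b c : Option String) :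
    (l.foldl (fun result env_var =>
          let name := PySem.Str.upper ((PySem.Dict.ofList env_var).getD "name" "")
          let value := (PySem.Dict.ofList env_var).get? "value"
          if name = "REPO_NAME" then result.insert "repo_name" value
          else if name = "BRANCH_NAME" then result.insert "branch_name" value
          else if name = "CUSTOM_REGISTRY_NAME" then result.insert "custom_registry_name" value
          else result)
        (PySem.Dict.ofList [("repo_name", a), ("branch_name", b), ("custom_registry_name", c)])).items
    = [("repo_name", pvTrace "REPO_NAME" l a),
       ("branch_name", pvTrace "BRANCH_NAME" l b),
       ("custom_registry_name", pvTrace "CUSTOM_REGISTRY_NAME" l c)] := by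
  induction l generalizing a b c with
  | nil => rfl
  | cons x l ih =>
    rw [List.foldl_cons]
    by_cases h1 : PySem.Str.upper ((PySem.Dict.ofList x).getD "name" "") = "REPO_NAME"
    · simp only [h1, String.reduceEq, reduceIte]
      have : (PySem.Dict.ofList [("repo_name", a), ("branch_name", b), ("custom_registry_name", c)]).insert
               "repo_name" ((PySem.Dict.ofList x).get? "value")
           = PySem.Dict.ofList [("repo_name", (PySem.Dict.ofList x).get? "value"), ("branch_name", b), ("custom_registry_name", c)] := rfl
      rw [this, ih]
      simp [pvTrace, h1]
    · by_cases h2 : PySem.Str.upper ((PySem.Dict.ofList x).getD "name" "") = "BRANCH_NAME"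
      · simp only [h2, String.reduceEq, reduceIte]
        have : (PySem.Dict.ofList [("repo_name", a), ("branch_name", b), ("custom_registry_name", c)]).insert
                 "branch_name" ((PySem.Dict.ofList x).get? "value")
             = PySem.Dict.ofList [("repo_name", a), ("branch_name", (PySem.Dict.ofList x).get? "value"), ("custom_registry_name", c)] := rfl
        rw [this, ih]
        simp [pvTrace, h2]
      · by_cases h3 : PySem.Str.upper ((PySem.Dict.ofList x).getD "name" "") = "CUSTOM_REGISTRY_NAME"
        · simp only [h3, String.reduceEq, reduceIte]
          have : (PySem.Dict.ofList [("repo_name", a), ("branch_name", b), ("custom_registry_name", c)]).insert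
                   "custom_registry_name" ((PySem.Dict.ofList x).get? "value")
               = PySem.Dict.ofList [("repo_name", a), ("branch_name", b), ("custom_registry_name", (PySem.Dict.ofList x).get? "value")] := rfl
          rw [this, ih]
          simp [pvTrace, h3]
        · simp only [h1, h2, h3, reduceIte]
          rw [ih]
          simp [pvTrace, h1, h2, h3]

-- backward first-match with explicit default
def pvFirstD (N : String) : List (List (String × String)) → Option String → Option String
  | [], cur => cur
  | x :: l, cur =>
      if PySem.Str.upper ((PySem.Dict.ofList x).getD "name" "") = N
      then (PySem.Dict.ofList x).get? "value"
      else pvFirstD N l cur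

lemma pvFirstD_snoc (N : String) (xs : List (List (String × String))) (x : List (String × String)) (cur : Option String) :
    pvFirstD N (xs ++ [x]) cur
      = pvFirstD N xs (if PySem.Str.upper ((PySem.Dict.ofList x).getD "name" "") = N
                       then (PySem.Dict.ofList x).get? "value" else cur) := by
  induction xs with
  | nil => simp [pvFirstD]
  | cons y ys ih => simp [pvFirstD, ih]

lemma pvTrace_eq_firstD (N : String) (l : List (List (String × String))) (cur : Option String) :
    pvTrace N l cur = pvFirstD N l.reverse cur := by
  induction l generalizing cur with
  | nil => rfl
  | cons x l ih =>
    rw [pvTrace, ih, List.reverse_cons, pvFirstD_snoc]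

lemma pvFirstD_none (N : String) (l : List (List (String × String))) :
    pvFirstD N l none = pvLastValue N l := by
  induction l with
  | nil => rfl
  | cons x l ih => simp [pvFirstD, pvLastValue, ih]

lemma pvTrace_none (N : String) (l : List (List (String × String))) :
    pvTrace N l none = pvLastValue N l.reverse := by
  rw [pvTrace_eq_firstD, pvFirstD_none]

-- ===== VERDICT (by name: the statement is the Claim_ definition above) =====
theorem extract_env_variables_spec : Claim_equal_extract_env_variables := by
  intro env_vars _
  unfold Spec_extract_env_variables extract_env_variables extract_env_variables_alt
  match env_vars with
  | none => rfl
  | some [] => rfl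
  | some (x :: l) =>
    simp only [Option.getD_some, List.isEmpty_cons, Bool.false_eq_true, reduceIte]
    rw [pvAfold (x :: l) none none none, pvTrace_none, pvTrace_none, pvTrace_none]
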